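-- pv_equiv track=rewrite | github.com/marcusbernstein/3dParser | viz/rendering.py | create_color_scheme
-- ===== SOURCE A (Python) =====
-- def create_color_scheme(num_features):
--     base_colors = [
--         (255, 0, 0), (0, 255, 0), (0, 0, 255), (255, 255, 0),
--         (255, 0, 255), (255, 182, 193), (152, 251, 152), (173, 216, 230),
--         (210, 105, 30), (184, 134, 11), (85, 107, 47), (255, 140, 0),
--         (148, 0, 211), (0, 206, 209), (219, 112, 147), (107, 142, 35),
--         (100, 149, 237), (255, 20, 147), (50, 205, 50), (25, 25, 112),
--         (218, 165, 32), (128, 0, 128), (72, 209, 204), (188, 143, 143)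
--     ]
--     return [base_colors[i % len(base_colors)] for i in range(num_features)]
-- ===== SOURCE B (Python) =====
-- def create_color_scheme(num_features):
--     # palette stored as packed 0xRRGGBB ints, decoded arithmetically once
--     packed = [0xFF0000, 0x00FF00, 0x0000FF, 0xFFFF00, 0xFF00FF, 0xFFB6C1,
--               0x98FB98, 0xADD8E6, 0xD2691E, 0xB8860B, 0x556B2F, 0xFF8C00,
--               0x9400D3, 0x00CED1, 0xDB7093, 0x6B8E23, 0x6495ED, 0xFF1493,
--               0x32CD32, 0x191970, 0xDAA520, 0x800080, 0x48D1CC, 0xBC8F8F]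
--     base = [(p // 65536, p // 256 % 256, p % 256) for p in packed]
--     # consume the palette as a cyclic stream: refill a working copy when exhausted
--     out = []
--     cur = []
--     for _ in range(num_features):
--         if not cur:
--             cur = list(base)
--         out.append(cur.pop(0))
--     return out
-- ===== Notes on version B (the rewrite author's own statement) =====
-- stated objective: alternative
-- what changed: B stores the palette as packed 0xRRGGBB integers decoded arithmetically once, and replaces the modulo-indexed comprehension by consuming the palette as a cyclic stream (a working copy refilled when exhausted, popped from the front).
import Mathlib
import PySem

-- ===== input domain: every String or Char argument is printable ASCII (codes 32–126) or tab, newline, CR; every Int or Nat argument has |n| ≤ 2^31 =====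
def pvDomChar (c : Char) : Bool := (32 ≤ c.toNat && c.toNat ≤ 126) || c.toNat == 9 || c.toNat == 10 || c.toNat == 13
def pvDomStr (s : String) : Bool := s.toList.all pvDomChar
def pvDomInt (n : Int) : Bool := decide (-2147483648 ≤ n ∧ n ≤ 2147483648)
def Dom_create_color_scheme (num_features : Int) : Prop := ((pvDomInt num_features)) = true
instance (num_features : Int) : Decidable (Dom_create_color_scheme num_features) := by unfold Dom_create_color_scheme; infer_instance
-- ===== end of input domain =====

-- B stores the palette as packed 0xRRGGBB ints decoded once and consumes it as a cyclic stream (refill-and-pop) instead of A's modulo-indexed comprehension; same values everywhere.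

-- ===== PORT A =====
def pvPalette : List (List Int) :=
  [[255, 0, 0], [0, 255, 0], [0, 0, 255], [255, 255, 0],
   [255, 0, 255], [255, 182, 193], [152, 251, 152], [173, 216, 230],
   [210, 105, 30], [184, 134, 11], [85, 107, 47], [255, 140, 0],
   [148, 0, 211], [0, 206, 209], [219, 112, 147], [107, 142, 35],
   [100, 149, 237], [255, 20, 147], [50, 205, 50], [25, 25, 112],
   [218, 165, 32], [128, 0, 128], [72, 209, 204], [188, 143, 143]]

-- base_colors[i % len(base_colors)] for i in range(num_features); the index is always in range, so pyGetD is exact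
def create_color_scheme (num_features : Int) : List (List Int) :=
  (PySem.List.pyRange 0 num_features 1).map
    (fun i => PySem.List.pyGetD pvPalette (PySem.Int.mod i (pvPalette.length : Int)) [])

-- ===== PORT B =====
-- packed = [0xRRGGBB, …]
def pvPacked : List Int :=
  [0xFF0000, 0x00FF00, 0x0000FF, 0xFFFF00, 0xFF00FF, 0xFFB6C1,
   0x98FB98, 0xADD8E6, 0xD2691E, 0xB8860B, 0x556B2F, 0xFF8C00,
   0x9400D3, 0x00CED1, 0xDB7093, 0x6B8E23, 0x6495ED, 0xFF1493,
   0x32CD32, 0x191970, 0xDAA520, 0x800080, 0x48D1CC, 0xBC8F8F]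

-- base = [(p // 65536, p // 256 % 256, p % 256) for p in packed]
def pvBase : List (List Int) :=
  pvPacked.map (fun p =>
    [PySem.Int.floordiv p 65536,
     PySem.Int.mod (PySem.Int.floordiv p 256) 256,
     PySem.Int.mod p 256])

-- the loop body of Source B: when the working copy is empty refill it from base, then pop its head
def cycTake (base : List (List Int)) : Nat → List (List Int) → List (List Int)
  | 0, _ => []
  | k + 1, [] =>
      match base with
      | [] => []
      | b :: bs => b :: cycTake base k bs
  | k + 1, c :: cs => c :: cycTake base k cs

def create_color_scheme_alt (num_features : Int) : List (List Int) :=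
  cycTake pvBase num_features.toNat []

-- ===== PRECONDITION & SPEC =====
def Spec_create_color_scheme (num_features : Int) (out : List (List Int)) : Prop := out = create_color_scheme_alt num_features
instance (num_features : Int) (out : List (List Int)) : Decidable (Spec_create_color_scheme num_features out) := by unfold Spec_create_color_scheme; infer_instance

-- ===== CLAIM =====
def Claim_equal_create_color_scheme : Prop := ∀ (num_features : Int), Dom_create_color_scheme num_features → Spec_create_color_scheme num_features (create_color_scheme num_features)

-- ===== LEMMAS AND PROOFS =====

-- decoding the packed palette yields exactly A's palette
theorem pvBase_eq_pvPalette : pvBase = pvPalette := by decide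

-- cyclic-stream invariant: if the remaining working copy is the suffix of the palette after `pre`,
-- the next k popped elements are base[(pre.length + t) % base.length] for t < k
theorem cycTake_eq_map (base : List (List Int)) (hb : base ≠ []) :
    ∀ (k : Nat) (pre cur : List (List Int)), base = pre ++ cur →
      cycTake base k cur =
        (List.range k).map (fun t => base.getD ((pre.length + t) % base.length) []) := by
  intro k
  induction k with
  | zero => intro pre cur _; simp [cycTake]
  | succ k ih =>
    intro pre cur hsplit
    cases cur with
    | nil =>
      cases hbase : base with
      | nil => exact absurd hbase hb
      | cons b bs =>
        simp only [cycTake]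
        have hpre : base = pre := by simpa using hsplit
        have hlen : pre.length = (b :: bs).length := by rw [← hpre, hbase]
        rw [List.range_succ_eq_map, List.map_cons, List.map_map, List.cons.injEq]
        refine ⟨?_, ?_⟩
        · rw [Nat.add_zero, hlen, Nat.mod_self]
          rfl
        · have hIH := ih [b] bs (by simp [hbase])
          rw [hbase] at hIH
          rw [hIH]
          apply List.map_congr_left
          intro t _
          simp only [Function.comp_apply, List.length_cons, List.length_nil]
          congr 1
          rw [hlen]
          simp only [List.length_cons, Nat.succ_eq_add_one]
          rw [Nat.add_mod_left]
          congr 1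
          omega
    | cons c cs =>
      simp only [cycTake]
      rw [List.range_succ_eq_map, List.map_cons, List.map_map, List.cons.injEq]
      refine ⟨?_, ?_⟩
      · have hlt : pre.length < base.length := by
          rw [hsplit]; simp
        rw [Nat.add_zero, Nat.mod_eq_of_lt hlt, hsplit]
        rw [List.getD_eq_getElem?_getD, List.getElem?_append_right (le_refl _)]
        simp
      · have hIH := ih (pre ++ [c]) cs (by rw [hsplit]; simp)
        rw [hIH]
        apply List.map_congr_left
        intro t _
        simp only [Function.comp_apply]
        congr 2
        simp
        omega

-- ===== VERDICT =====
theorem create_color_scheme_spec : Claim_equal_create_color_scheme := by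
  intro n _
  unfold Spec_create_color_scheme create_color_scheme create_color_scheme_alt
  rw [pvBase_eq_pvPalette]
  rw [cycTake_eq_map pvPalette (by decide) n.toNat pvPalette [] (by simp)]
  rw [PySem.List.pyRange_one, List.map_map]
  have hsub : ((n : Int) - 0).toNat = n.toNat := by omega
  rw [hsub]
  apply List.map_congr_left
  intro t _
  simp only [Function.comp_apply, zero_add]
  rw [show ((pvPalette.length : Nat) : Int) = ((24 : Nat) : Int) from rfl]
  rw [PySem.Int.mod_natCast, PySem.List.pyGetD_natCast]
  rw [Nat.add_mod_left]
  rfl
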